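-- pv_equiv track=rewrite | github.com/morrisonmatthewb/DocumentationGenerator | utils/documentation.py | organize_documentation_by_dir
-- ===== SOURCE A (Python) =====
-- from collections import defaultdict
--
-- def organize_documentation_by_dir(documentation):
--     """
--     Organize documentation by directory to be displayed in expected format.
--
--     Args:
--         documentation: Dictionary mapping file paths to documentation content
--
--     Returns:
--         Dict[str, Any] reorganized such that root files come first, then the rest sorted alphabetically by their parent directory
--     """
--     if not documentation:
--         return None
--
--     organized_doc = {}
--     path_dict = defaultdict(list)
--     for file_path, doc in documentation.items():
--         dirs = file_path.split("/")
--         if len(dirs) == 1: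
--             organized_doc[file_path] = doc
--         else:
--             path_dict["".join(dirs[:-1])].append((file_path, doc))
--     sorted_documentation = defaultdict(list, sorted(path_dict.items()))
--     for _, files in sorted_documentation.items():
--         for file_path, doc in files:
--             organized_doc[file_path] = doc
--
--     return organized_doc
-- ===== SOURCE B (Python) =====
-- def organize_documentation_by_dir(documentation):
--     """Root files first in insertion order; then, for each distinct parent-directory key in
--     sorted order, rescan the input and append that key's files in insertion order."""
--     if not documentation:
--         return None
--
--     def dir_key(path):
--         parts = path.split("/")
--         return None if len(parts) == 1 else "".join(parts[:-1])
--
--     result = {p: d for p, d in documentation.items() if dir_key(p) is None}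
--     for k in sorted({dir_key(p) for p in documentation if dir_key(p) is not None}):
--         for p, d in documentation.items():
--             if dir_key(p) == k:
--                 result[p] = d
--     return result
-- ===== Notes on version B (the rewrite author's own statement) =====
-- stated objective: alternative
-- what changed: Drops A's dict-of-lists grouping index and item sort entirely: B collects the set of distinct parent-directory keys, sorts it, and for each key rescans the input appending matching files, so no grouped structure is ever built.
import Mathlib
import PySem

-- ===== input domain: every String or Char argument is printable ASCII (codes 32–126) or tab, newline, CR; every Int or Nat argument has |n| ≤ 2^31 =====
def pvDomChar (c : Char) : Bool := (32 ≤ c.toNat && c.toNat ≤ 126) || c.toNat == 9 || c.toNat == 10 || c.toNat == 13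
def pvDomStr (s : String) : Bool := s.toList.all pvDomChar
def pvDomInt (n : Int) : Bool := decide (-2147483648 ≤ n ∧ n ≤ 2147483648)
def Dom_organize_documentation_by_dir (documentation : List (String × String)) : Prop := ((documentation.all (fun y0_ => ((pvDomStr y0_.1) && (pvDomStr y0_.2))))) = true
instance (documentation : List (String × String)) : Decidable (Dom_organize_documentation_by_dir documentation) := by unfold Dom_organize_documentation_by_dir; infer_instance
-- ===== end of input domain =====

-- B drops A's dict-of-lists grouping index and item sort: it sorts the set of distinct
-- parent-directory keys and rescans the input once per key (objective: alternative;
-- same result; neither version mutates the argument).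


-- ===== PORT A =====
-- file_path.split("/") : "/" is a nonempty literal, so split? is always `some`; getD [] only totalizes.
-- dirs[:-1] is dirs.take (dirs.length - 1) (exact: [:-1] drops the last element).
-- sorted(path_dict.items()): dict keys are unique, so tuple comparison never goes past the key;
-- sorting by the key alone is exact here.
def organize_documentation_by_dir (documentation : List (String × String)) : Option (List (String × String)) :=
  if documentation.isEmpty then none
  else
    let st := documentation.foldl
      (fun (st : PySem.Dict String String × PySem.Dict String (List (String × String))) p =>
        let dirs := (PySem.Str.split? p.1 "/").getD []
        if dirs.length = 1 then
          (st.1.insert p.1 p.2, st.2)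
        else
          (st.1, st.2.modify (PySem.Str.join "" (dirs.take (dirs.length - 1))) [] (fun fs => fs ++ [p])))
      (PySem.Dict.empty, PySem.Dict.empty)
    let sortedDocs := PySem.List.sorted st.2.items (fun kv => kv.1) false
    let organized := sortedDocs.foldl
      (fun d kv => kv.2.foldl (fun d q => d.insert q.1 q.2) d) st.1
    some organized.items

-- ===== PORT B =====
-- port of Source B's nested helper dir_key (None for a root file, the joined parent dirs otherwise)
def organize_dir_key (path : String) : Option String :=
  let parts := (PySem.Str.split? path "/").getD []
  if parts.length = 1 then none else some (PySem.Str.join "" (parts.take (parts.length - 1)))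

-- the set comprehension is PySem.Set.ofList (order irrelevant: it is sorted right after);
-- the dict comprehension and each inner rescan are conditional-insert folds over the input.
def organize_documentation_by_dir_alt (documentation : List (String × String)) : Option (List (String × String)) :=
  if documentation.isEmpty then none
  else
    let result0 := documentation.foldl
      (fun (d : PySem.Dict String String) p =>
        if (organize_dir_key p.1).isNone then d.insert p.1 p.2 else d)
      PySem.Dict.empty
    let ks := PySem.List.sorted
      (PySem.Set.ofList (documentation.filterMap (fun p => organize_dir_key p.1))) (fun k => k) false
    some ((ks.foldl
      (fun d k => documentation.foldl
        (fun (d : PySem.Dict String String) p =>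
          if organize_dir_key p.1 == some k then d.insert p.1 p.2 else d) d)
      result0).items)

-- ===== PRECONDITION & SPEC =====
def Spec_organize_documentation_by_dir (documentation : List (String × String)) (out : Option (List (String × String))) : Prop := out = organize_documentation_by_dir_alt documentation
instance (documentation : List (String × String)) (out : Option (List (String × String))) : Decidable (Spec_organize_documentation_by_dir documentation out) := by unfold Spec_organize_documentation_by_dir; infer_instance

-- ===== CLAIM (what is proved, stated in full; the proofs are below) =====
def Claim_equal_organize_documentation_by_dir : Prop := ∀ (documentation : List (String × String)), Dom_organize_documentation_by_dir documentation → Spec_organize_documentation_by_dir documentation (organize_documentation_by_dir documentation)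

-- ===== LEMMAS AND PROOFS =====

def pvKey (p : String × String) : String :=
  let dirs := (PySem.Str.split? p.1 "/").getD []
  PySem.Str.join "" (dirs.take (dirs.length - 1))

def pvIsRoot (p : String × String) : Bool :=
  ((PySem.Str.split? p.1 "/").getD []).length = 1

def pvTriples (docs : List (String × String)) : List (String × (String × String)) :=
  docs.filterMap (fun p => if pvIsRoot p then none else some (pvKey p, p.1, p.2))

theorem pv_dir_key_eq (p : String × String) :
    organize_dir_key p.1 = if pvIsRoot p then none else some (pvKey p) := by
  simp only [organize_dir_key, pvIsRoot, pvKey]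
  split_ifs with h h' h'
  · rfl
  · simp at h'; exact absurd h h'
  · simp at h'; exact absurd h' h
  · rfl

theorem pv_fold_A (docs : List (String × String)) (dA : PySem.Dict String String)
    (dP : PySem.Dict String (List (String × String))) :
    docs.foldl
      (fun (st : PySem.Dict String String × PySem.Dict String (List (String × String))) p =>
        let dirs := (PySem.Str.split? p.1 "/").getD []
        if dirs.length = 1 then
          (st.1.insert p.1 p.2, st.2)
        else
          (st.1, st.2.modify (PySem.Str.join "" (dirs.take (dirs.length - 1))) [] (fun fs => fs ++ [p])))
      (dA, dP)
    = ((docs.filter pvIsRoot).foldl (fun d p => d.insert p.1 p.2) dA,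
       (pvTriples docs).foldl (fun d t => d.modify t.1 [] (fun fs => fs ++ [t.2])) dP) := by
  induction docs generalizing dA dP with
  | nil => rfl
  | cons p docs ih =>
    by_cases h : ((PySem.Str.split? p.1 "/").getD []).length = 1
    · have hroot : pvIsRoot p = true := by simp [pvIsRoot, h]
      have htri : pvTriples (p :: docs) = pvTriples docs := by simp [pvTriples, hroot]
      simp [List.foldl_cons, hroot, htri, h, ih]
    · have hroot : pvIsRoot p = false := by simp [pvIsRoot, h]
      have htri : pvTriples (p :: docs) = (pvKey p, p.1, p.2) :: pvTriples docs := by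
        simp [pvTriples, hroot]
      simp [List.foldl_cons, hroot, htri, h, ih, pvKey]

theorem pv_sorted_items (T : List (String × (String × String))) :
    PySem.List.sorted
        ((T.foldl (fun d t => d.modify t.1 [] (fun fs => fs ++ [t.2])) PySem.Dict.empty).items)
        (fun kv => kv.1) false
      = (PySem.List.sorted (PySem.Set.ofList (T.map (fun t => t.1))) (fun k => k) false).map
          (fun k => (k, (T.filter (fun t => t.1 == k)).map (fun t => t.2))) := by
  set G := T.foldl (fun d t => d.modify t.1 [] (fun fs => fs ++ [t.2])) PySem.Dict.empty with hG
  have hkeys : G.keys = PySem.Set.ofList (T.map (fun t => t.1)) := by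
    rw [hG, PySem.Dict.keys_foldl_modify_key T (fun t => t.1) [] (fun d t fs => fs ++ [t.2])]
    simp [PySem.Dict.keys_empty, PySem.Set.update_nil_left]
  have hnd : G.keys.Nodup := by rw [hkeys]; exact PySem.Set.nodup_ofList _
  have hitems : G.items = G.keys.map (fun k => (k, (T.filter (fun t => t.1 == k)).map (fun t => t.2))) := by
    rw [PySem.Dict.items_eq_map_keys G hnd []]
    apply List.map_congr_left
    intro k _
    rw [hG, PySem.Dict.getD_foldl_modify_append T PySem.Dict.empty k]
    simp [PySem.Dict.getD_empty]
  apply PySem.List.sorted_eq_of_perm_of_pairwise_lt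
  · rw [hitems]
    exact ((PySem.List.sorted_perm _ _ _).trans (hkeys ▸ List.Perm.refl _)).map _
  · rw [List.pairwise_map]
    exact PySem.List.sorted_ofList_pairwise_lt _

theorem pv_roots_B (docs : List (String × String)) (d0 : PySem.Dict String String) :
    docs.foldl
      (fun (d : PySem.Dict String String) p =>
        if (organize_dir_key p.1).isNone then d.insert p.1 p.2 else d) d0
    = (docs.filter pvIsRoot).foldl (fun d p => d.insert p.1 p.2) d0 := by
  have hfun : (fun (d : PySem.Dict String String) (p : String × String) =>
      if (organize_dir_key p.1).isNone then d.insert p.1 p.2 else d)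
      = (fun d p => if pvIsRoot p then d.insert p.1 p.2 else d) := by
    funext d p
    rw [pv_dir_key_eq]
    by_cases h : pvIsRoot p <;> simp [h]
  rw [hfun]
  induction docs generalizing d0 with
  | nil => rfl
  | cons p docs ih =>
    by_cases h : pvIsRoot p <;> simp [h, ih]

theorem pv_keys_B (docs : List (String × String)) :
    docs.filterMap (fun p => organize_dir_key p.1) = (pvTriples docs).map (fun t => t.1) := by
  have hfun : (fun (p : String × String) => organize_dir_key p.1)
      = (fun p => if pvIsRoot p then none else some (pvKey p)) := by
    funext p; exact pv_dir_key_eq p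
  rw [hfun]
  induction docs with
  | nil => rfl
  | cons p docs ih =>
    by_cases h : pvIsRoot p
    · have htri : pvTriples (p :: docs) = pvTriples docs := by simp [pvTriples, h]
      simp [h, htri, ih]
    · have htri : pvTriples (p :: docs) = (pvKey p, p.1, p.2) :: pvTriples docs := by
        simp [pvTriples, h]
      simp [h, htri, ih]

theorem pv_inner_B (docs : List (String × String)) (k : String) (d0 : PySem.Dict String String) :
    docs.foldl
      (fun (d : PySem.Dict String String) p =>
        if organize_dir_key p.1 == some k then d.insert p.1 p.2 else d) d0
    = (((pvTriples docs).filter (fun t => t.1 == k)).map (fun t => t.2)).foldl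
        (fun d q => d.insert q.1 q.2) d0 := by
  have hfun : (fun (d : PySem.Dict String String) (p : String × String) =>
      if organize_dir_key p.1 == some k then d.insert p.1 p.2 else d)
      = (fun d p => if pvIsRoot p = false ∧ pvKey p = k then d.insert p.1 p.2 else d) := by
    funext d p
    rw [pv_dir_key_eq]
    by_cases h : pvIsRoot p
    · simp [h]
    · by_cases hk : pvKey p = k <;> simp [h, hk]
  rw [hfun]
  induction docs generalizing d0 with
  | nil => rfl
  | cons p docs ih =>
    by_cases h : pvIsRoot p
    · have htri : pvTriples (p :: docs) = pvTriples docs := by simp [pvTriples, h]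
      simp [h, htri, ih]
    · have htri : pvTriples (p :: docs) = (pvKey p, p.1, p.2) :: pvTriples docs := by
        simp [pvTriples, h]
      by_cases hk : pvKey p = k
      · simp [h, htri, hk, ih]
      · simp [h, htri, hk, ih]

-- ===== VERDICT (by name: the statement is the Claim_ definition above) =====
theorem organize_documentation_by_dir_spec : Claim_equal_organize_documentation_by_dir := by
  intro docs _
  unfold Spec_organize_documentation_by_dir
  unfold organize_documentation_by_dir organize_documentation_by_dir_alt
  by_cases hemp : docs.isEmpty
  · simp [hemp]
  · simp only [hemp, Bool.false_eq_true, if_false]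
    simp only [pv_fold_A, pv_roots_B, pv_keys_B, pv_sorted_items]
    rw [List.foldl_map]
    congr 2
    apply PySem.List.foldl_congr_mem
    intro d k _
    exact (pv_inner_B docs k d).symm
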